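-- pv_equiv track=rewrite | github.com/exe5988e-rgb/JarvisMerged | scripts/patch_applier.py | extract_diff
-- ===== SOURCE A (Python) =====
-- def extract_diff(content: str) -> str:
--     """Extract unified diff from LLM response."""
--     lines = content.split('\n')
--     diff_lines = []
--     in_diff = False
--
--     for line in lines:
--         if line.startswith('---') or line.startswith('diff --git'):
--             in_diff = True
--         if in_diff:
--             diff_lines.append(line)
--
--     return '\n'.join(diff_lines) if diff_lines else content
-- ===== SOURCE B (Python) =====
-- def extract_diff(content: str) -> str:
--     """Extract unified diff from LLM response."""
--     # Work on the raw string: a diff starts at the first line beginning with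
--     # '---' or 'diff --git', i.e. at position 0 or right after a newline.
--     if content.startswith('---') or content.startswith('diff --git'):
--         return content
--     j1 = content.find('\n---')
--     j2 = content.find('\ndiff --git')
--     cands = [j for j in (j1, j2) if j != -1]
--     if not cands:
--         return content
--     return content[min(cands) + 1:]
-- ===== Notes on version B (the rewrite author's own statement) =====
-- stated objective: alternative
-- what changed: B never splits the text into lines: it searches the raw string for the earliest occurrence of a diff marker at a line start (position 0 via startswith, otherwise the minimum of find('\n---') and find('\ndiff --git')) and slices the string once there, instead of A's line loop with a sticky in_diff flag that rebuilds the result line by line.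
import Mathlib
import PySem

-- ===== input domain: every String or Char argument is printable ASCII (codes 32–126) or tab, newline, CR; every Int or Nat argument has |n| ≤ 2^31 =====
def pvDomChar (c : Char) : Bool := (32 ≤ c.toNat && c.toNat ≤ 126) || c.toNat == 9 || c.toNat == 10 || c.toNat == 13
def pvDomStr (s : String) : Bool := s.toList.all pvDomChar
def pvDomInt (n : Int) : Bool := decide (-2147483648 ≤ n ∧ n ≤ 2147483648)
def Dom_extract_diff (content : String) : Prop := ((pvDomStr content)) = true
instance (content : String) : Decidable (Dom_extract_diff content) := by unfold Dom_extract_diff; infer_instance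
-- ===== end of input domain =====

-- B never splits the text into lines: it searches the raw string for the earliest
-- marker at a line start (position 0 via startswith, else the minimum of
-- find('\n---') and find('\ndiff --git')) and slices the string once there
-- (objective: alternative, same cost).

-- ===== PORT A =====
-- line.startswith('---') or line.startswith('diff --git')
def pvIsStart (l : String) : Bool :=
  PySem.Str.startswith l "---" || PySem.Str.startswith l "diff --git"

-- the for-loop over lines with state (in_diff, diff_lines)
def pvLoopA : List String → Bool → List String → Bool × List String
  | [], ind, acc => (ind, acc)
  | l :: rest, ind, acc =>
    let ind' := if pvIsStart l then true else ind
    let acc' := if ind' then acc ++ [l] else acc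
    pvLoopA rest ind' acc'

def extract_diff (content : String) : String :=
  let lines := (PySem.Str.split? content "\n").getD []  -- split? is some (sep ≠ "")
  let diff_lines := (pvLoopA lines false []).2
  if diff_lines.isEmpty then content else PySem.Str.join "\n" diff_lines

-- ===== PORT B =====
def extract_diff_alt (content : String) : String :=
  if PySem.Str.startswith content "---" || PySem.Str.startswith content "diff --git" then
    content
  else
    let j1 := PySem.Str.find content "\n---"
    let j2 := PySem.Str.find content "\ndiff --git"
    -- cands = [j for j in (j1, j2) if j != -1]; Python's guarded min(cands) is min?
    -- (none exactly when cands is empty, i.e. Python's 'if not cands' branch)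
    match PySem.List.min? ([j1, j2].filter (fun j => j != -1)) (fun j => j) with
    | none => content
    | some m => PySem.Str.slice content (some (m + 1)) none  -- content[min(cands)+1:]

-- ===== PRECONDITION & SPEC =====
def Spec_extract_diff (content : String) (out : String) : Prop := out = extract_diff_alt content
instance (content : String) (out : String) : Decidable (Spec_extract_diff content out) := by unfold Spec_extract_diff; infer_instance

-- ===== CLAIM (what is proved, stated in full; the proofs are below) =====
def Claim_equal_extract_diff : Prop := ∀ (content : String), Dom_extract_diff content → Spec_extract_diff content (extract_diff content)

-- ===== LEMMAS AND PROOFS =====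

-- ---- A-side characterisation (String level) ----

-- proof-only: the suffix of ls from its first diff-start line
def pvSuffix? : List String → Option (List String)
  | [] => none
  | l :: rest => if pvIsStart l then some (l :: rest) else pvSuffix? rest

theorem pvLoopA_true (ls : List String) (acc : List String) :
    (pvLoopA ls true acc).2 = acc ++ ls := by
  induction ls generalizing acc with
  | nil => simp [pvLoopA]
  | cons l rest ih =>
    simp only [pvLoopA]
    split <;> simp [ih]

theorem pvLoopA_false (ls : List String) (acc : List String) :
    (pvLoopA ls false acc).2 = acc ++ (pvSuffix? ls).getD [] := by
  induction ls generalizing acc with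
  | nil => simp [pvLoopA, pvSuffix?]
  | cons l rest ih =>
    simp only [pvLoopA, pvSuffix?]
    by_cases h : pvIsStart l = true
    · simp [h, pvLoopA_true]
    · simp [h, ih]

theorem pvSuffix?_ne_nil (ls s : List String) (h : pvSuffix? ls = some s) : s ≠ [] := by
  induction ls with
  | nil => simp [pvSuffix?] at h
  | cons l rest ih =>
    simp only [pvSuffix?] at h
    split at h
    · cases h; simp
    · exact ih h

-- ---- char-level split into lines ----

-- structural split on '\n' (pre = current piece built so far)
def pvSplitNl : List Char → List Char → List (List Char)
  | pre, [] => [pre]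
  | pre, c :: rest => if c = '\n' then pre :: pvSplitNl [] rest else pvSplitNl (pre ++ [c]) rest

theorem pvSplitOn_go (fuel : Nat) (l cur : List Char) (acc : List (List Char)) (h : l.length < fuel) :
    PySem.Chars.splitOn.go ['\n'] fuel l cur acc = acc.reverse ++ pvSplitNl cur.reverse l := by
  induction fuel generalizing l cur acc with
  | zero => omega
  | succ fuel ih =>
    cases l with
    | nil => simp [PySem.Chars.splitOn.go, pvSplitNl]
    | cons c rest =>
      by_cases hc : c = '\n'
      · subst hc
        simp only [PySem.Chars.splitOn.go]
        rw [if_pos (by simp [List.isPrefixOf])]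
        simp only [List.length_cons, List.length_nil, List.drop_succ_cons, List.drop_zero]
        rw [ih rest [] (cur.reverse :: acc) (by simp at h; omega)]
        simp [pvSplitNl]
      · simp only [PySem.Chars.splitOn.go]
        rw [if_neg (by simp [List.isPrefixOf]; exact fun hh => absurd hh.symm hc)]
        rw [ih rest (c :: cur) acc (by simp at h; omega)]
        simp [pvSplitNl, hc]

theorem pvSplitOn_eq (cs : List Char) :
    PySem.Chars.splitOn cs ['\n'] = pvSplitNl [] cs := by
  unfold PySem.Chars.splitOn
  rw [pvSplitOn_go (cs.length + 1) cs [] [] (by omega)]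
  simp

theorem pvSplitNl_ne_nil (pre l : List Char) : pvSplitNl pre l ≠ [] := by
  induction l generalizing pre with
  | nil => simp [pvSplitNl]
  | cons c rest ih =>
    simp only [pvSplitNl]
    split
    · simp
    · exact ih _

theorem pvJoin_splitNl (pre l : List Char) :
    PySem.Chars.join ['\n'] (pvSplitNl pre l) = pre ++ l := by
  induction l generalizing pre with
  | nil => simp [pvSplitNl, PySem.Chars.join_singleton]
  | cons c rest ih =>
    simp only [pvSplitNl]
    by_cases hc : c = '\n'
    · subst hc
      rw [if_pos rfl]
      cases hS : pvSplitNl [] rest with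
      | nil => exact absurd hS (pvSplitNl_ne_nil [] rest)
      | cons s0 S' =>
        rw [PySem.Chars.join_cons_cons]
        have ihr := ih []
        rw [hS] at ihr
        rw [ihr]
        simp
    · rw [if_neg hc]
      rw [ih (pre ++ [c])]
      simp

theorem pvSplitNl_NLfree (pre l x : List Char) (hp : '\n' ∉ pre)
    (hx : x ∈ pvSplitNl pre l) : '\n' ∉ x := by
  induction l generalizing pre with
  | nil =>
    simp only [pvSplitNl, List.mem_singleton] at hx
    subst hx; exact hp
  | cons c rest ih =>
    simp only [pvSplitNl] at hx
    by_cases hc : c = '\n'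
    · rw [if_pos hc] at hx
      rcases List.mem_cons.mp hx with h | h
      · subst h; exact hp
      · exact ih [] (by simp) h
    · rw [if_neg hc] at hx
      exact ih (pre ++ [c]) (by simp [hp, Ne.symm hc]) hx

-- ---- prefixes of a joined line list ----

theorem pvPrefix_of_prefix_append (p h t : List Char) (hp : '\n' ∉ p)
    (hpre : p <+: h ++ '\n' :: t) : p <+: h := by
  induction h generalizing p with
  | nil =>
    cases p with
    | nil => exact List.nil_prefix
    | cons a p' =>
      rw [List.nil_append, List.cons_prefix_cons] at hpre
      exact absurd (hpre.1 ▸ List.mem_cons_self) hp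
  | cons c h' ih =>
    cases p with
    | nil => exact List.nil_prefix
    | cons a p' =>
      rw [List.cons_append, List.cons_prefix_cons] at hpre
      have hp' : '\n' ∉ p' := fun hm => hp (List.mem_cons_of_mem _ hm)
      exact List.cons_prefix_cons.mpr ⟨hpre.1, ih p' hp' hpre.2⟩

theorem pvPrefix_join (p r : List Char) (rs : List (List Char)) (hp : '\n' ∉ p) :
    p <+: PySem.Chars.join ['\n'] (r :: rs) ↔ p <+: r := by
  cases rs with
  | nil =>
    rw [PySem.Chars.join_singleton]
  | cons q rest =>
    rw [PySem.Chars.join_cons_cons]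
    have hshape : r ++ ['\n'] ++ PySem.Chars.join ['\n'] (q :: rest)
        = r ++ '\n' :: PySem.Chars.join ['\n'] (q :: rest) := by simp
    rw [hshape]
    constructor
    · exact fun hpre => pvPrefix_of_prefix_append p r _ hp hpre
    · exact fun hpre => hpre.trans (List.prefix_append r _)

-- ---- find: first-occurrence characterisations ----

theorem pvFind_eq_of (s sub : List Char) (j : Nat) (h1 : sub <+: s.drop j)
    (h2 : ∀ i < j, ¬ sub <+: s.drop i) : PySem.Chars.find s sub = j := by
  have hinf : sub <:+: s := by
    rw [← PySem.Chars.isIn_iff_infix, ← PySem.Chars.exists_prefix_drop_iff_isIn]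
    exact ⟨j, h1⟩
  have h0 : 0 ≤ PySem.Chars.find s sub := (PySem.Chars.find_nonneg_iff s sub).mpr hinf
  obtain ⟨hpfx, hmin⟩ := PySem.Chars.find_spec h0
  rcases Nat.lt_trichotomy (PySem.Chars.find s sub).toNat j with hlt | heq | hgt
  · exact absurd hpfx (h2 _ hlt)
  · omega
  · exact absurd h1 (hmin j hgt)

theorem pvFind_eq_neg_one_of (s sub : List Char) (h : ∀ i, ¬ sub <+: s.drop i) :
    PySem.Chars.find s sub = -1 := by
  rw [PySem.Chars.find_eq_neg_one_iff]
  intro hinf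
  rw [← PySem.Chars.isIn_iff_infix, ← PySem.Chars.exists_prefix_drop_iff_isIn] at hinf
  obtain ⟨j, hj⟩ := hinf
  exact h j hj

theorem pvFind_no_nl (s sub : List Char) (hs : '\n' ∉ s) (hsub : '\n' ∈ sub) :
    PySem.Chars.find s sub = -1 := by
  apply pvFind_eq_neg_one_of
  intro i hpre
  exact hs ((List.drop_sublist i s).subset (hpre.subset hsub))

-- position inside the first line: no '\n'-led match can start there
theorem pvNoMatch_inside (l t p : List Char) (hl : '\n' ∉ l) (i : Nat) (hi : i < l.length) :
    ¬ ('\n' :: p) <+: (l ++ '\n' :: t).drop i := by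
  intro hpre
  rw [List.drop_append_of_le_length (Nat.le_of_lt hi), List.drop_eq_getElem_cons hi,
    List.cons_append, List.cons_prefix_cons] at hpre
  exact hl (hpre.1 ▸ List.getElem_mem hi)

-- past the first line: dropping reaches into t
theorem pvDrop_past (l t : List Char) (i : Nat) (hi : l.length + 1 ≤ i) :
    (l ++ '\n' :: t).drop i = t.drop (i - (l.length + 1)) := by
  have : l ++ '\n' :: t = (l ++ ['\n']) ++ t := by simp
  rw [this, List.drop_append, List.drop_eq_nil_of_le (by simp; omega)]
  simp

theorem pvFindShift (l t p : List Char) (hl : '\n' ∉ l) :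
    PySem.Chars.find (l ++ '\n' :: t) ('\n' :: p) =
      if p.isPrefixOf t then (l.length : Int)
      else if PySem.Chars.find t ('\n' :: p) = -1 then -1
      else l.length + 1 + PySem.Chars.find t ('\n' :: p) := by
  by_cases hpt : p.isPrefixOf t
  · rw [if_pos hpt]
    apply pvFind_eq_of
    · rw [List.drop_left]
      exact List.cons_prefix_cons.mpr ⟨rfl, List.isPrefixOf_iff_prefix.mp hpt⟩
    · exact pvNoMatch_inside l t p hl
  · rw [if_neg hpt]
    rw [List.isPrefixOf_iff_prefix] at hpt
    by_cases hft : PySem.Chars.find t ('\n' :: p) = -1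
    · rw [if_pos hft]
      apply pvFind_eq_neg_one_of
      intro i hpre
      rcases Nat.lt_trichotomy i l.length with hlt | heq | hgt
      · exact pvNoMatch_inside l t p hl i hlt hpre
      · subst heq
        rw [List.drop_left, List.cons_prefix_cons] at hpre
        exact hpt hpre.2
      · rw [pvDrop_past l t i (by omega)] at hpre
        have : PySem.Chars.find t ('\n' :: p) ≠ -1 := by
          rw [PySem.Chars.find_ne_neg_one_iff]
          rw [← PySem.Chars.isIn_iff_infix, ← PySem.Chars.exists_prefix_drop_iff_isIn]
          exact ⟨_, hpre⟩
        exact this hft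
    · rw [if_neg hft]
      have h0 : 0 ≤ PySem.Chars.find t ('\n' :: p) := by
        have := PySem.Chars.neg_one_le_find t ('\n' :: p)
        omega
      obtain ⟨hpfx, hmin⟩ := PySem.Chars.find_spec h0
      set k : Nat := (PySem.Chars.find t ('\n' :: p)).toNat with hk
      have hkv : PySem.Chars.find t ('\n' :: p) = (k : Int) := by omega
      rw [hkv]
      have : ((l.length : Int) + 1 + (k : Int)) = ((l.length + 1 + k : Nat) : Int) := by
        push_cast; ring
      rw [this]
      apply pvFind_eq_of
      · rw [pvDrop_past l t (l.length + 1 + k) (by omega)]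
        have : l.length + 1 + k - (l.length + 1) = k := by omega
        rw [this]
        exact hpfx
      · intro i hi hpre
        rcases Nat.lt_trichotomy i l.length with hlt | heq | hgt
        · exact pvNoMatch_inside l t p hl i hlt hpre
        · subst heq
          rw [List.drop_left, List.cons_prefix_cons] at hpre
          exact hpt hpre.2
        · rw [pvDrop_past l t i (by omega)] at hpre
          exact hmin (i - (l.length + 1)) (by omega) hpre

-- ---- B-side cut point, char level ----

def pvCutC (cs : List Char) : Option Int :=
  PySem.List.min? (([PySem.Chars.find cs ('\n' :: "---".toList),
                     PySem.Chars.find cs ('\n' :: "diff --git".toList)]).filter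
    (fun j => j != -1)) (fun j => j)

def pvMarkT (t : List Char) : Bool :=
  "---".toList.isPrefixOf t || "diff --git".toList.isPrefixOf t

theorem pvCutC_no_nl (cs : List Char) (h : '\n' ∉ cs) : pvCutC cs = none := by
  unfold pvCutC
  rw [pvFind_no_nl cs _ h List.mem_cons_self, pvFind_no_nl cs _ h List.mem_cons_self]
  simp [PySem.List.min?]

-- pure arithmetic of the two-candidate guarded minimum
theorem pvMin2 (L a b : Int) (pa pb : Bool) (hL : 0 ≤ L) (ha : -1 ≤ a) (hb : -1 ≤ b) :
    PySem.List.min? (([if pa then L else if a = -1 then -1 else L + 1 + a,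
                       if pb then L else if b = -1 then -1 else L + 1 + b]).filter
      (fun j => j != -1)) (fun j => j)
    = if pa || pb then some L
      else Option.map (fun j => L + 1 + j)
        (PySem.List.min? (([a, b]).filter (fun j => j != -1)) (fun j => j)) := by
  have hLne : (L != -1) = true := by simp; omega
  cases pa <;> cases pb <;>
    simp only [if_true, if_false, Bool.true_or, Bool.or_true, Bool.or_self, Bool.false_eq_true]
  · -- pa = false, pb = false
    by_cases ha1 : a = -1 <;> by_cases hb1 : b = -1
    · simp [PySem.List.min?, List.filter, ha1, hb1]
    · have hbne : (L + 1 + b != -1) = true := by simp; omega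
      simp [PySem.List.min?, List.filter, ha1, hb1, hbne, (by simp; omega : (b != -1) = true)]
    · have hane : (L + 1 + a != -1) = true := by simp; omega
      simp [PySem.List.min?, List.filter, ha1, hb1, hane, (by simp; omega : (a != -1) = true)]
    · have hane : (L + 1 + a != -1) = true := by simp; omega
      have hbne : (L + 1 + b != -1) = true := by simp; omega
      have hiff : (L + 1 + b < L + 1 + a) = (b < a) := by
        rw [eq_iff_iff]; omega
      by_cases hab : b < a <;>
        simp [PySem.List.min?, List.filter, ha1, hb1, hane, hbne, hiff, hab,
          (by simp; omega : (a != -1) = true), (by simp; omega : (b != -1) = true)]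
  · -- pa = false, pb = true
    by_cases ha1 : a = -1
    · simp [PySem.List.min?, List.filter, ha1, hLne]
    · have hane : (L + 1 + a != -1) = true := by simp; omega
      have : (L < L + 1 + a) := by omega
      simp [PySem.List.min?, List.filter, ha1, hane, hLne, this]
  · -- pa = true, pb = false
    by_cases hb1 : b = -1
    · simp [PySem.List.min?, List.filter, hb1, hLne]
    · have hbne : (L + 1 + b != -1) = true := by simp; omega
      have : ¬ (L + 1 + b < L) := by omega
      simp [PySem.List.min?, List.filter, hb1, hbne, hLne, this]
  · -- pa = true, pb = true
    simp [PySem.List.min?, List.filter, hLne]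

theorem pvCutShift (l t : List Char) (hl : '\n' ∉ l) :
    pvCutC (l ++ '\n' :: t) =
      if pvMarkT t then some (l.length : Int)
      else (pvCutC t).map (fun j => (l.length : Int) + 1 + j) := by
  unfold pvCutC pvMarkT
  rw [pvFindShift l t _ hl, pvFindShift l t _ hl]
  exact pvMin2 (l.length : Int) _ _ _ _ (by omega)
    (PySem.Chars.neg_one_le_find t ('\n' :: "---".toList))
    (PySem.Chars.neg_one_le_find t ('\n' :: "diff --git".toList))

-- ---- first marked line, char level ----

def pvMarkC (l : List Char) : Bool :=
  PySem.Chars.startswith l "---".toList || PySem.Chars.startswith l "diff --git".toList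

def pvSfxC : List (List Char) → Option (List (List Char))
  | [] => none
  | l :: rest => if pvMarkC l then some (l :: rest) else pvSfxC rest

theorem pvMarkT_head (r : List Char) (rs : List (List Char)) :
    pvMarkT (PySem.Chars.join ['\n'] (r :: rs)) = pvMarkC r := by
  unfold pvMarkT pvMarkC
  have b1 : "---".toList.isPrefixOf (PySem.Chars.join ['\n'] (r :: rs))
      = PySem.Chars.startswith r "---".toList := by
    simp only [PySem.Chars.startswith]
    rw [Bool.eq_iff_iff, List.isPrefixOf_iff_prefix, List.isPrefixOf_iff_prefix]
    exact pvPrefix_join _ r rs (by decide)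
  have b2 : "diff --git".toList.isPrefixOf (PySem.Chars.join ['\n'] (r :: rs))
      = PySem.Chars.startswith r "diff --git".toList := by
    simp only [PySem.Chars.startswith]
    rw [Bool.eq_iff_iff, List.isPrefixOf_iff_prefix, List.isPrefixOf_iff_prefix]
    exact pvPrefix_join _ r rs (by decide)
  rw [b1, b2]

-- the heart: B's cut point in join(l0::ls) finds exactly A's first marked line of ls
theorem pvMain (ls : List (List Char)) (l0 : List Char)
    (hls : ∀ x ∈ ls, '\n' ∉ x) (h0 : '\n' ∉ l0) :
    match pvCutC (PySem.Chars.join ['\n'] (l0 :: ls)), pvSfxC ls with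
    | none, none => True
    | some j, some s =>
        0 ≤ j ∧ (PySem.Chars.join ['\n'] (l0 :: ls)).drop (j + 1).toNat =
          PySem.Chars.join ['\n'] s
    | _, _ => False := by
  induction ls generalizing l0 with
  | nil =>
    rw [PySem.Chars.join_singleton, pvCutC_no_nl l0 h0]
    simp [pvSfxC]
  | cons r rs ih =>
    have hshape : PySem.Chars.join ['\n'] (l0 :: r :: rs)
        = l0 ++ '\n' :: PySem.Chars.join ['\n'] (r :: rs) := by
      rw [PySem.Chars.join_cons_cons]; simp
    rw [hshape, pvCutShift l0 _ h0, pvMarkT_head r rs]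
    by_cases hm : pvMarkC r
    · rw [if_pos hm]
      simp only [pvSfxC, hm, if_true]
      constructor
      · omega
      · have : ((l0.length : Int) + 1).toNat = l0.length + 1 := by omega
        rw [this, pvDrop_past l0 _ (l0.length + 1) (by omega)]
        simp
    · rw [if_neg hm]
      simp only [pvSfxC, hm]
      have ihr := ih r (fun x hx => hls x (List.mem_cons_of_mem _ hx))
        (hls r List.mem_cons_self)
      cases hcut : pvCutC (PySem.Chars.join ['\n'] (r :: rs)) with
      | none =>
        rw [hcut] at ihr
        cases hsfx : pvSfxC rs with
        | none => simp
        | some s => rw [hsfx] at ihr; simp at ihr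
      | some j =>
        rw [hcut] at ihr
        cases hsfx : pvSfxC rs with
        | none => rw [hsfx] at ihr; simp at ihr
        | some s =>
          rw [hsfx] at ihr
          simp only at ihr
          obtain ⟨hj, hdrop⟩ := ihr
          simp only [Option.map_some]
          refine ⟨by omega, ?_⟩
          have harith : ((l0.length : Int) + 1 + j + 1).toNat
              = l0.length + 1 + (j + 1).toNat := by omega
          rw [harith, pvDrop_past l0 _ _ (by omega)]
          have : l0.length + 1 + (j + 1).toNat - (l0.length + 1) = (j + 1).toNat := by omega
          rw [this]
          exact hdrop

-- ---- bridging String ↔ char lines ----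

theorem pvIsStart_toList (l : String) : pvIsStart l = pvMarkC l.toList := by
  simp [pvIsStart, pvMarkC, PySem.Str.startswith_eq]

theorem pvSuffix?_toList (lines : List String) :
    (pvSuffix? lines).map (List.map String.toList) = pvSfxC (lines.map String.toList) := by
  induction lines with
  | nil => simp [pvSuffix?, pvSfxC]
  | cons l rest ih =>
    simp only [pvSuffix?, List.map_cons, pvSfxC, pvIsStart_toList]
    by_cases h : pvMarkC l.toList
    · simp [h]
    · simp [h, ih]

-- lines of content: Str.split? is some, and its char image is pvSplitNl
theorem pvLines_spec (content : String) :
    ∃ lines, PySem.Str.split? content "\n" = some lines ∧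
      lines.map String.toList = pvSplitNl [] content.toList := by
  have h := PySem.Str.split?_map content "\n"
  have hsep : ("\n" : String).toList = ['\n'] := by decide
  rw [hsep] at h
  unfold PySem.Chars.split? at h
  rw [if_neg (by simp)] at h
  rw [pvSplitOn_eq] at h
  cases hs : PySem.Str.split? content "\n" with
  | none => rw [hs] at h; simp at h
  | some lines =>
    rw [hs] at h
    simp only [Option.map_some, Option.some.injEq] at h
    exact ⟨lines, rfl, h⟩

-- B's match scrutinee is pvCutC of the char list
theorem pvScrut_eq (content : String) :
    PySem.List.min? (([PySem.Str.find content "\n---",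
        PySem.Str.find content "\ndiff --git"]).filter (fun j => j != -1)) (fun j => j)
      = pvCutC content.toList := by
  unfold pvCutC
  rw [PySem.Str.find_eq, PySem.Str.find_eq]
  have h1 : ("\n---" : String).toList = '\n' :: "---".toList := by decide
  have h2 : ("\ndiff --git" : String).toList = '\n' :: "diff --git".toList := by decide
  rw [h1, h2]

-- ===== VERDICT (by name: the statement is the Claim_ definition above) =====
theorem extract_diff_spec : Claim_equal_extract_diff := by
  intro content _
  unfold Spec_extract_diff
  apply String.toList_injective
  obtain ⟨lines, hsplit, hmap⟩ := pvLines_spec content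
  have hjoin : PySem.Chars.join ['\n'] (pvSplitNl [] content.toList) = content.toList := by
    rw [pvJoin_splitNl]; simp
  have hfree : ∀ x ∈ pvSplitNl [] content.toList, '\n' ∉ x :=
    fun x hx => pvSplitNl_NLfree [] content.toList x (by simp) hx
  cases hlsc : pvSplitNl [] content.toList with
  | nil => exact absurd hlsc (pvSplitNl_ne_nil [] content.toList)
  | cons l0 ls =>
    rw [hlsc] at hjoin hfree hmap
    -- B's startswith test = pvMarkC l0
    have hstart : (PySem.Str.startswith content "---"
        || PySem.Str.startswith content "diff --git") = pvMarkC l0 := by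
      rw [PySem.Str.startswith_eq, PySem.Str.startswith_eq]
      unfold pvMarkC
      have c1 : PySem.Chars.startswith content.toList ("---" : String).toList
          = PySem.Chars.startswith l0 "---".toList := by
        simp only [PySem.Chars.startswith]
        rw [Bool.eq_iff_iff, List.isPrefixOf_iff_prefix, List.isPrefixOf_iff_prefix, ← hjoin]
        exact pvPrefix_join _ l0 ls (by decide)
      have c2 : PySem.Chars.startswith content.toList ("diff --git" : String).toList
          = PySem.Chars.startswith l0 "diff --git".toList := by
        simp only [PySem.Chars.startswith]
        rw [Bool.eq_iff_iff, List.isPrefixOf_iff_prefix, List.isPrefixOf_iff_prefix, ← hjoin]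
        exact pvPrefix_join _ l0 ls (by decide)
      rw [c1, c2]
    have hsfx : (pvSuffix? lines).map (List.map String.toList) = pvSfxC (l0 :: ls) := by
      rw [pvSuffix?_toList, hmap]
    unfold extract_diff extract_diff_alt
    rw [hsplit]
    simp only [Option.getD_some]
    rw [pvLoopA_false lines [], List.nil_append]
    by_cases hm : pvMarkC l0
    · -- first line is a marker: A keeps every line, B returns content via startswith
      rw [hstart, hm, if_pos (show (true = true) from rfl)]
      have : pvSfxC (l0 :: ls) = some (l0 :: ls) := by simp [pvSfxC, hm]
      rw [this] at hsfx
      cases hsuf : pvSuffix? lines with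
      | none => rw [hsuf] at hsfx; simp at hsfx
      | some s =>
        rw [hsuf] at hsfx
        simp only [Option.map_some, Option.some.injEq] at hsfx
        simp only [Option.getD_some]
        rw [if_neg (by simpa [List.isEmpty_iff] using pvSuffix?_ne_nil lines s hsuf)]
        rw [PySem.Str.toList_join, hsfx]
        have : ("\n" : String).toList = ['\n'] := by decide
        rw [this, hjoin]
    · have hm' : pvMarkC l0 = false := by simpa using hm
      rw [hstart, hm', if_neg (show ¬(false = true) by simp)]
      rw [pvScrut_eq content]
      have hmain := pvMain ls l0 (fun x hx => hfree x (List.mem_cons_of_mem _ hx))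
        (hfree l0 List.mem_cons_self)
      rw [hjoin] at hmain
      have hsfxtail : pvSfxC (l0 :: ls) = pvSfxC ls := by simp [pvSfxC, hm]
      rw [hsfxtail] at hsfx
      cases hcut : pvCutC content.toList with
      | none =>
        rw [hcut] at hmain
        cases hsfxv : pvSfxC ls with
        | some s => rw [hsfxv] at hmain; simp at hmain
        | none =>
          rw [hsfxv] at hsfx
          cases hsuf : pvSuffix? lines with
          | some s => rw [hsuf] at hsfx; simp at hsfx
          | none =>
            simp
      | some j =>
        rw [hcut] at hmain
        cases hsfxv : pvSfxC ls with
        | none => rw [hsfxv] at hmain; simp at hmain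
        | some s =>
          rw [hsfxv] at hmain
          simp only at hmain
          obtain ⟨hj, hdrop⟩ := hmain
          rw [hsfxv] at hsfx
          cases hsuf : pvSuffix? lines with
          | none => rw [hsuf] at hsfx; simp at hsfx
          | some s' =>
            rw [hsuf] at hsfx
            simp only [Option.map_some, Option.some.injEq] at hsfx
            simp only [Option.getD_some]
            rw [if_neg (by simpa [List.isEmpty_iff] using pvSuffix?_ne_nil lines s' hsuf)]
            rw [PySem.Str.toList_join, PySem.Str.toList_slice]
            simp only [PySem.Chars.slice_eq_listSlice]
            rw [PySem.List.slice_from content.toList (show (0:Int) ≤ j + 1 by omega)]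
            rw [hdrop, hsfx]
            have : ("\n" : String).toList = ['\n'] := by decide
            rw [this]
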